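-- pv_equiv track=rewrite | github.com/leelachr/sterling-engine | dict repr of eqs.py | listVars
-- ===== SOURCE A (Python) =====
-- def listVars(equations):
--     variables = []
--     for equation in equations:
--         for term in equation:
--             if term == "sumIs":
--                 continue
--             variables.append(term)
--     # remove duplicates from list
--     duplicatesRemoved = list(set(variables))
--     # sort alphabetically
--     sortedVars = sorted(duplicatesRemoved)
--     # place "sumIs" at last position.
--     # we want the last matrix column
--     # to be sumIs.
--     sortedVars.append("sumIs")
--     return sortedVars
-- ===== SOURCE B (Python) =====
-- def listVars(equations):
--     # flatten all non-"sumIs" terms (duplicates kept), sort once, then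
--     # dedup adjacent equal entries in a single pass; no set is built.
--     terms = []
--     for equation in equations:
--         terms.extend(t for t in equation if t != "sumIs")
--     terms.sort()
--     out = []
--     prev = None
--     for t in terms:
--         if t != prev:
--             out.append(t)
--             prev = t
--     out.append("sumIs")
--     return out
-- ===== Notes on version B (the rewrite author's own statement) =====
-- stated objective: alternative
-- what changed: Instead of building a hash set of all terms and sorting its distinct elements, B flattens all non-sumIs terms with duplicates, sorts the full list once, and removes duplicates by a single adjacent-equality scan with a 'prev' sentinel, never constructing a set.
import Mathlib
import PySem

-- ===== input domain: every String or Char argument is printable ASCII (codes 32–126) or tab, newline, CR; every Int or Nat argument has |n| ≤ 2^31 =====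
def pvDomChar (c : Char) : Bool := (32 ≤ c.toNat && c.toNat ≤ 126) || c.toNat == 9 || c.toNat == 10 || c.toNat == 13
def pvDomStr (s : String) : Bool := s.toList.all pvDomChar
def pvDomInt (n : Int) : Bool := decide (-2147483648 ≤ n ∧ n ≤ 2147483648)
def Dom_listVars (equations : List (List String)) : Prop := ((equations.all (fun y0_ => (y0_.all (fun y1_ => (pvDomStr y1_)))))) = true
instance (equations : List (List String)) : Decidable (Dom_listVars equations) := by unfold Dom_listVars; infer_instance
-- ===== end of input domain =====

-- B flattens all non-"sumIs" terms with duplicates, sorts once, and removes duplicates by an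
-- adjacent-equality scan instead of building a set; same return value, alternative decomposition.


-- ===== PORT A =====
def listVars (equations : List (List String)) : List String :=
  -- variables = []; for equation in equations: for term in equation: if term == "sumIs": continue; variables.append(term)
  let vars0 : List String :=
    equations.foldl (fun vs equation =>
      equation.foldl (fun vs term => if term == "sumIs" then vs else vs ++ [term]) vs) []
  -- sorted(list(set(variables))) ++ ["sumIs"]  (a sort without key consumes the set order-insensitively)
  let sortedVars := PySem.List.sorted (PySem.Set.ofList vars0) (fun x => x) false
  sortedVars ++ ["sumIs"]

-- ===== PORT B =====
-- for t in terms: if t != prev: out.append(t); prev = t   — state (out, prev)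
def pvDedupStep (acc : List String × Option String) (t : String) : List String × Option String :=
  if acc.2 = some t then acc else (acc.1 ++ [t], some t)

def listVars_alt (equations : List (List String)) : List String :=
  -- terms = []; for equation in equations: terms.extend(t for t in equation if t != "sumIs")
  let terms : List String :=
    equations.foldl (fun acc equation => acc ++ equation.filter (fun t => !(t == "sumIs"))) []
  let sortedTerms := PySem.List.sorted terms (fun x => x) false
  (sortedTerms.foldl pvDedupStep ([], none)).1 ++ ["sumIs"]

-- ===== PRECONDITION & SPEC =====
def Spec_listVars (equations : List (List String)) (out : List String) : Prop := out = listVars_alt equations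
instance (equations : List (List String)) (out : List String) : Decidable (Spec_listVars equations out) := by unfold Spec_listVars; infer_instance

-- ===== CLAIM (what is proved, stated in full; the proofs are below) =====
def Claim_equal_listVars : Prop := ∀ (equations : List (List String)), Dom_listVars equations → Spec_listVars equations (listVars equations)

-- ===== LEMMAS AND PROOFS =====

-- recursive form of B's adjacent-dedup loop
def pvDD (prev : Option String) : List String → List String
  | [] => []
  | t :: rest => if prev = some t then pvDD prev rest else t :: pvDD (some t) rest

theorem pvDedup_foldl_eq (l : List String) : ∀ (out : List String) (prev : Option String),
    (l.foldl pvDedupStep (out, prev)).1 = out ++ pvDD prev l := by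
  induction l with
  | nil => intro out prev; simp [pvDD]
  | cons t rest ih =>
      intro out prev
      by_cases h : prev = some t <;>
        simp [pvDD, pvDedupStep, h, ih, List.append_assoc]

theorem mem_pvDD_of_mem {x : String} : ∀ (l : List String) (prev : Option String),
    x ∈ l → x ∈ pvDD prev l ∨ prev = some x := by
  intro l
  induction l with
  | nil => intro prev h; cases h
  | cons t rest ih =>
      intro prev h
      by_cases hp : prev = some t
      · rcases List.mem_cons.mp h with h' | h'
        · right; subst h'; exact hp
        · simpa [pvDD, hp] using ih prev h'
      · rcases List.mem_cons.mp h with h' | h'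
        · left; simp [pvDD, hp, h']
        · rcases ih (some t) h' with h'' | h''
          · left; simp [pvDD, hp, h'']
          · left; simp [pvDD, hp]
            left; exact (Option.some_inj.mp h'').symm

theorem mem_of_mem_pvDD {x : String} : ∀ (l : List String) (prev : Option String),
    x ∈ pvDD prev l → x ∈ l := by
  intro l
  induction l with
  | nil => intro prev h; simp [pvDD] at h
  | cons t rest ih =>
      intro prev h
      by_cases hp : prev = some t
      · simp only [pvDD, if_pos hp] at h
        exact List.mem_cons_of_mem _ (ih prev h)
      · simp only [pvDD, if_neg hp, List.mem_cons] at h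
        rcases h with h | h
        · exact List.mem_cons.mpr (Or.inl h)
        · exact List.mem_cons_of_mem _ (ih (some t) h)

theorem pvDD_pairwise : ∀ (l : List String) (prev : Option String),
    l.Pairwise (· ≤ ·) → (∀ x ∈ l, ∀ p, prev = some p → p ≤ x) →
    (pvDD prev l).Pairwise (· < ·) ∧ ∀ x ∈ pvDD prev l, ∀ p, prev = some p → p < x := by
  intro l
  induction l with
  | nil => intro prev _ _; constructor <;> simp [pvDD]
  | cons t rest ih =>
      intro prev hpw hall
      rcases List.pairwise_cons.mp hpw with ⟨hle, hrest⟩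
      by_cases hp : prev = some t
      · have hall' : ∀ x ∈ rest, ∀ p, prev = some p → p ≤ x := by
          intro x hx p hpp
          have : p = t := by rw [hp] at hpp; exact (Option.some_inj.mp hpp).symm
          exact this ▸ hle x hx
        have := ih prev hrest hall'
        simpa [pvDD, hp] using this
      · have hall' : ∀ x ∈ rest, ∀ p, (some t : Option String) = some p → p ≤ x := by
          intro x hx p hpp
          exact (Option.some_inj.mp hpp) ▸ hle x hx
        obtain ⟨h1, h2⟩ := ih (some t) hrest hall'
        refine ⟨?_, ?_⟩
        · simp only [pvDD, if_neg hp, List.pairwise_cons]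
          exact ⟨fun x hx => h2 x hx t rfl, h1⟩
        · intro x hx p hpp
          have hpt : p ≤ t := hall t (List.mem_cons_self) p hpp
          have hptne : p ≠ t := by
            intro he; exact hp (by rw [hpp, he])
          simp only [pvDD, if_neg hp, List.mem_cons] at hx
          rcases hx with rfl | hx
          · exact lt_of_le_of_ne hpt hptne
          · exact lt_trans (lt_of_le_of_ne hpt hptne) (h2 x hx t rfl)

theorem flat_eq (equations : List (List String)) :
    equations.foldl (fun vs equation =>
        equation.foldl (fun vs term => if term == "sumIs" then vs else vs ++ [term]) vs) []
    = equations.foldl (fun acc equation => acc ++ equation.filter (fun t => !(t == "sumIs"))) [] := by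
  apply PySem.List.foldl_congr_mem
  intro acc eq _
  have : eq.foldl (fun vs term => if !(term == "sumIs") then vs ++ [term] else vs) acc
      = acc ++ eq.filter (fun t => !(t == "sumIs")) :=
    PySem.List.foldl_append_if_eq_filter _ _ _
  rw [← this]
  apply PySem.List.foldl_congr_mem
  intro acc' term _
  by_cases h : term == "sumIs" <;> simp [h]

-- ===== VERDICT (by name: the statement is the Claim_ definition above) =====
theorem listVars_spec : Claim_equal_listVars := by
  intro equations _
  unfold Spec_listVars listVars listVars_alt
  rw [← flat_eq]
  set flat := equations.foldl (fun vs equation =>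
      equation.foldl (fun vs term => if term == "sumIs" then vs else vs ++ [term]) vs) [] with hflat
  dsimp only
  rw [pvDedup_foldl_eq]
  simp only [List.nil_append]
  congr 1
  set s := PySem.List.sorted flat (fun x => x) false with hs
  have hs_pw : s.Pairwise (· ≤ ·) := PySem.List.sorted_pairwise flat (fun x => x)
  obtain ⟨hlt, -⟩ := pvDD_pairwise s none hs_pw (by intro x _ p hp; cases hp)
  apply PySem.List.sorted_eq_of_perm_of_pairwise_lt
  · -- (pvDD none s).Perm (Set.ofList flat)
    apply List.perm_of_nodup_nodup_toFinset_eq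
    · exact hlt.imp ne_of_lt
    · exact PySem.Set.nodup_ofList flat
    · apply Finset.ext
      intro x
      simp only [List.mem_toFinset, PySem.Set.mem_ofList]
      constructor
      · intro h
        have := mem_of_mem_pvDD s none h
        exact (PySem.List.mem_sorted _ _ _ _).mp this
      · intro h
        have hx : x ∈ s := (PySem.List.mem_sorted _ _ _ _).mpr h
        rcases mem_pvDD_of_mem s none hx with h' | h'
        · exact h'
        · cases h'
  · exact hlt
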